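-- pv_equiv track=rewrite | github.com/bye430/bioinformatics_test | genetest.py | find_fuzzy_matches
-- ===== SOURCE A (Python) =====
-- def find_fuzzy_matches(seq1, seq2):
--     """查找模糊匹配并返回匹配的下标"""
--     matches = []
--     longest_match = ("", -1, -1)  # (匹配子序列, 西蓝花下标, 卷心菜下标)
--     len1, len2 = len(seq1), len(seq2)
--
--     # 逐个子序列进行匹配
--     for start in range(len1):
--         for end in range(start + 1, len1 + 1):
--             subseq = seq1[start:end]
--             if subseq in seq2:
--                 match_index = seq2.index(subseq)
--                 matches.append((start, match_index, subseq))
--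
--                 # 更新最长匹配
--                 if len(subseq) > len(longest_match[0]):
--                     longest_match = (subseq, start, match_index)
--
--     return matches, longest_match
-- ===== SOURCE B (Python) =====
-- def find_fuzzy_matches(seq1, seq2):
--     """Per start position: extend the substring one char at a time.  The first
--     occurrence of an extension can only move right, so keep the previous match
--     index: if the occurrence there extends by the next character it stays the
--     first occurrence (O(1) check, no scan); otherwise resume seq2.find from it.
--     Stop the inner loop as soon as an extension no longer occurs in seq2, and
--     track the best length in a plain int instead of re-measuring tuples."""
--     matches = []
--     longest_match = ("", -1, -1)
--     best = 0
--     len1, len2 = len(seq1), len(seq2)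
--     find = seq2.find
--     append = matches.append
--     for start in range(len1):
--         idx = 0
--         for end in range(start + 1, len1 + 1):
--             sub = seq1[start:end]
--             if not (idx + end - start <= len2 and seq2[idx + end - start - 1] == seq1[end - 1]):
--                 idx = find(sub, idx)
--                 if idx < 0:
--                     break
--             append((start, idx, sub))
--             if end - start > best:
--                 best = end - start
--                 longest_match = (sub, start, idx)
--     return matches, longest_match
-- ===== Notes on version B (the rewrite author's own statement) =====
-- stated objective: faster
-- what changed: Instead of testing every (start,end) substring against seq2 from scratch with 'in' plus '.index', B extends each start's substring one character at a time, keeps the previous first-occurrence index (an O(1) character check decides whether it still is the first occurrence, otherwise seq2.find resumes from it), breaks the inner loop at the first failed extension, and tracks the longest-match length in a plain int; intended as faster — a timing run measured ~1.7-2.7x on its largest all-equal-character inputs (run-to-run noise), with A timing out where B returned in one run.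
import Mathlib
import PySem

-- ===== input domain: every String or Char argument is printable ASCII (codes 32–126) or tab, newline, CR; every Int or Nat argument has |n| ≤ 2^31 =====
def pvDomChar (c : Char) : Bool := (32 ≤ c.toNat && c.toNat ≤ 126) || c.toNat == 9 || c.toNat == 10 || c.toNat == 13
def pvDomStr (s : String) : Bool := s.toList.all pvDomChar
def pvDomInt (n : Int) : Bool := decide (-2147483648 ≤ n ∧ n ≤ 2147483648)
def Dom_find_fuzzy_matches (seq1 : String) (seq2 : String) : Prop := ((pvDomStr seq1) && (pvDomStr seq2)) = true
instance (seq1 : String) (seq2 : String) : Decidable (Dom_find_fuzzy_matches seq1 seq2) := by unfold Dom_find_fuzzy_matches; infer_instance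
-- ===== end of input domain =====

-- B replaces A's per-substring in/.index scans by one extend-and-resume search per start with an
-- early break; objective: faster (intended; a timing run measured ~1.7-2.7x at its largest sizes).

-- ===== PORT A =====
def find_fuzzy_matches (seq1 : String) (seq2 : String) : (List (Int × Int × String)) × (String × Int × Int) :=
  let len1 : Int := PySem.Str.len seq1
  let _len2 : Int := PySem.Str.len seq2
  (PySem.List.pyRange 0 len1 1).foldl (fun st start =>
    (PySem.List.pyRange (start + 1) (len1 + 1) 1).foldl (fun st e =>
      let subseq := PySem.Str.slice seq1 (some start) (some e)
      if PySem.Str.isIn subseq seq2 then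
        let match_index := PySem.Str.find seq2 subseq
        let matchesL := st.1 ++ [(start, match_index, subseq)]
        let longest := if PySem.Str.len subseq > PySem.Str.len st.2.1
                       then (subseq, start, match_index) else st.2
        (matchesL, longest)
      else st) st)
    ([], ("", -1, -1))

-- ===== PORT B =====
-- B's inner loop: `idx = seq2.find(sub, idx)` resumed search with an O(1)
-- extension check (`seq2[idx+end-start-1] == seq1[end-1]`) and `break`;
-- the running state is ((matches, longest_match), best)
def fuzzyInnerB (seq1 : String) (seq2 : String) (start : Int) (ends : List Int) (idx : Int)
    (stb : ((List (Int × Int × String)) × (String × Int × Int)) × Int) :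
    ((List (Int × Int × String)) × (String × Int × Int)) × Int :=
  match ends with
  | [] => stb
  | e :: rest =>
    let sub := PySem.Str.slice seq1 (some start) (some e)
    if decide (idx + e - start ≤ PySem.Str.len seq2)
        && (PySem.Str.pyGet? seq2 (idx + e - start - 1) == PySem.Str.pyGet? seq1 (e - 1)) then
      fuzzyInnerB seq1 seq2 start rest idx
        ((stb.1.1 ++ [(start, idx, sub)],
          if e - start > stb.2 then (sub, start, idx) else stb.1.2),
         if e - start > stb.2 then e - start else stb.2)
    else
      let idx' := PySem.Str.findFrom seq2 sub idx none
      if idx' < 0 then stb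
      else
        fuzzyInnerB seq1 seq2 start rest idx'
          ((stb.1.1 ++ [(start, idx', sub)],
            if e - start > stb.2 then (sub, start, idx') else stb.1.2),
           if e - start > stb.2 then e - start else stb.2)

def find_fuzzy_matches_alt (seq1 : String) (seq2 : String) : (List (Int × Int × String)) × (String × Int × Int) :=
  let len1 : Int := PySem.Str.len seq1
  let res := (PySem.List.pyRange 0 len1 1).foldl (fun stb start =>
    fuzzyInnerB seq1 seq2 start (PySem.List.pyRange (start + 1) (len1 + 1) 1) 0 stb)
    (([], ("", -1, -1)), 0)
  res.1

-- ===== PRECONDITION & SPEC =====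
def Spec_find_fuzzy_matches (seq1 : String) (seq2 : String) (out : (List (Int × Int × String)) × (String × Int × Int)) : Prop := out = find_fuzzy_matches_alt seq1 seq2
instance (seq1 : String) (seq2 : String) (out : (List (Int × Int × String)) × (String × Int × Int)) : Decidable (Spec_find_fuzzy_matches seq1 seq2 out) := by unfold Spec_find_fuzzy_matches; infer_instance

-- ===== CLAIM (what is proved, stated in full; the proofs are below) =====
def Claim_equal_find_fuzzy_matches : Prop := ∀ (seq1 : String) (seq2 : String), Dom_find_fuzzy_matches seq1 seq2 → Spec_find_fuzzy_matches seq1 seq2 (find_fuzzy_matches seq1 seq2)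



-- ===== LEMMAS AND PROOFS =====

-- A's inner-loop body, named so the proofs can speak about it (definitionally the lambda in port A)
def fuzzyStepA (seq1 : String) (seq2 : String) (start : Int)
    (st : (List (Int × Int × String)) × (String × Int × Int)) (e : Int) :
    (List (Int × Int × String)) × (String × Int × Int) :=
  let subseq := PySem.Str.slice seq1 (some start) (some e)
  if PySem.Str.isIn subseq seq2 then
    let match_index := PySem.Str.find seq2 subseq
    let matchesL := st.1 ++ [(start, match_index, subseq)]
    let longest := if PySem.Str.len subseq > PySem.Str.len st.2.1
                   then (subseq, start, match_index) else st.2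
    (matchesL, longest)
  else st

-- the slice seq1[start:p] on the list side
lemma slice_toList (seq1 : String) (start p : Int) (hs : 0 ≤ start) (hp : 0 ≤ p) :
    (PySem.Str.slice seq1 (some start) (some p)).toList
      = List.take (p.toNat - start.toNat) (List.drop start.toNat seq1.toList) := by
  rw [PySem.Str.toList_slice, PySem.Chars.slice_eq_listSlice, PySem.List.slice_toNat _ hs hp]

-- slices from the same start are prefixes of the later ones
lemma slice_prefix_mono (seq1 : String) (start p p' : Int) (hs : 0 ≤ start) (hp : 0 ≤ p)
    (hpp : p ≤ p') :
    (PySem.Str.slice seq1 (some start) (some p)).toList <+: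
    (PySem.Str.slice seq1 (some start) (some p')).toList := by
  rw [slice_toList seq1 start p hs hp, slice_toList seq1 start p' hs (by omega)]
  exact List.take_prefix_take_left (by omega)

-- an occurrence (prefix of a drop) is an infix
lemma infix_of_prefix_drop {sub s : List Char} {j : Nat} (h : sub <+: List.drop j s) :
    sub <:+: s :=
  h.isInfix.trans (List.drop_suffix j s).isInfix

-- find points at the first occurrence: an occurrence at k with none before it IS find
lemma find_eq_of_first (s sub : List Char) (k : Nat)
    (hocc : sub <+: List.drop k s)
    (hmin : ∀ i, i < k → ¬ sub <+: List.drop i s) :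
    PySem.Chars.find s sub = (k : Int) := by
  have hf0 : 0 ≤ PySem.Chars.find s sub :=
    (PySem.Chars.find_nonneg_iff s sub).mpr (infix_of_prefix_drop hocc)
  obtain ⟨hpre, hmin'⟩ := PySem.Chars.find_spec hf0
  have h1 : ¬ (PySem.Chars.find s sub).toNat < k := fun h => hmin _ h hpre
  have h2 : ¬ k < (PySem.Chars.find s sub).toNat := fun h => hmin' _ h hocc
  omega

-- resumed find: if no occurrence of sub starts before k, find(sub, k) = find(sub)
lemma findFrom_eq_find (s sub : List Char) (k : Nat) (hk : k ≤ s.length)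
    (hocc : ∀ i, i < k → ¬ sub <+: List.drop i s) :
    PySem.Chars.findFrom s sub (k : Int) = PySem.Chars.find s sub := by
  by_cases hin : sub <:+: s
  · have hf0 : 0 ≤ PySem.Chars.find s sub := (PySem.Chars.find_nonneg_iff s sub).mpr hin
    obtain ⟨hpre, hmin⟩ := PySem.Chars.find_spec hf0
    have hkf : k ≤ (PySem.Chars.find s sub).toNat := by
      by_contra h
      exact hocc _ (by omega) hpre
    have hne : PySem.Chars.findFrom s sub (k : Int) ≠ -1 := by
      rw [Ne, PySem.Chars.findFrom_natCast_eq_neg_one_iff s sub k hk]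
      intro hcon
      apply hcon
      have hd : sub <+: List.drop ((PySem.Chars.find s sub).toNat - k) (List.drop k s) := by
        rw [List.drop_drop]
        have h1 : k + ((PySem.Chars.find s sub).toNat - k) = (PySem.Chars.find s sub).toNat := by
          omega
        rw [h1]; exact hpre
      exact hd.isInfix.trans (List.drop_suffix _ _).isInfix
    obtain ⟨hge, hpre', hmin'⟩ := PySem.Chars.findFrom_natCast_spec s sub k hk hne
    have h1 : (PySem.Chars.find s sub).toNat ≤ (PySem.Chars.findFrom s sub (k : Int)).toNat := by
      by_contra h
      exact hmin _ (by omega) hpre'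
    have h2 : ¬ (PySem.Chars.find s sub).toNat < (PySem.Chars.findFrom s sub (k : Int)).toNat := by
      intro h
      exact hmin' _ hkf h hpre
    have hff0 : (0 : Int) ≤ PySem.Chars.findFrom s sub (k : Int) := le_trans (by positivity) hge
    omega
  · rw [(PySem.Chars.find_eq_neg_one_iff s sub).mpr hin,
      (PySem.Chars.findFrom_natCast_eq_neg_one_iff s sub k hk).mpr]
    intro hcon
    exact hin (hcon.trans (List.drop_suffix k s).isInfix)

-- once a substring fails to occur, A's remaining iterations (all extensions) do nothing
lemma foldA_dead (seq1 seq2 : String) (start : Int) :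
    ∀ (ends : List Int) (st : (List (Int × Int × String)) × (String × Int × Int)),
    (∀ e ∈ ends,
      PySem.Str.isIn (PySem.Str.slice seq1 (some start) (some e)) seq2 = false) →
    ends.foldl (fuzzyStepA seq1 seq2 start) st = st := by
  intro ends
  induction ends with
  | nil => intro st _; rfl
  | cons e rest ih =>
    intro st h
    have he := h e (List.mem_cons_self)
    have hstep : fuzzyStepA seq1 seq2 start st e = st := by
      simp only [fuzzyStepA, he]
      rfl
    rw [List.foldl_cons, hstep]
    exact ih st (fun e' he' => h e' (List.mem_cons_of_mem _ he'))

-- main inner-loop correspondence, by fuel over the remaining range [pe+1, b):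
-- invariant: k is the first occurrence of the previous substring seq1[start:pe],
-- and the carried best is the length of the current longest match
lemma innerAB (seq1 seq2 : String) (start b : Int) (hs : 0 ≤ start)
    (hb : b ≤ (seq1.toList.length : Int) + 1) :
    ∀ (n : Nat) (pe : Int) (k : Nat)
      (st : (List (Int × Int × String)) × (String × Int × Int)),
    (b - pe - 1).toNat = n →
    start ≤ pe →
    k ≤ seq2.toList.length →
    (PySem.Str.slice seq1 (some start) (some pe)).toList <+: List.drop k seq2.toList →
    (∀ i, i < k →
      ¬ (PySem.Str.slice seq1 (some start) (some pe)).toList <+: List.drop i seq2.toList) →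
    fuzzyInnerB seq1 seq2 start (PySem.List.pyRange (pe + 1) b 1) (k : Int)
        (st, PySem.Str.len st.2.1)
      = ((PySem.List.pyRange (pe + 1) b 1).foldl (fuzzyStepA seq1 seq2 start) st,
         PySem.Str.len
           (((PySem.List.pyRange (pe + 1) b 1).foldl (fuzzyStepA seq1 seq2 start) st)).2.1) := by
  intro n
  induction n with
  | zero =>
    intro pe k st hfuel _ _ _ _
    rw [PySem.List.pyRange_one_eq_nil (by omega)]
    rfl
  | succ n ih =>
    intro pe k st hfuel hspe hk hprevOcc hprevMin
    have hlt : pe + 1 < b := by omega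
    rw [PySem.List.pyRange_one_cons (by omega)]
    set e := pe + 1 with he
    -- bounds
    have hpeL : pe.toNat < seq1.toList.length := by omega
    have hsub : (PySem.Str.slice seq1 (some start) (some e)).toList
        = (PySem.Str.slice seq1 (some start) (some pe)).toList ++ [seq1.toList[pe.toNat]] := by
      rw [slice_toList seq1 start pe hs (by omega), slice_toList seq1 start e hs (by omega)]
      have h1 : e.toNat - start.toNat = (pe.toNat - start.toNat) + 1 := by omega
      rw [h1, List.take_add_one, List.getElem?_drop]
      have h2 : start.toNat + (pe.toNat - start.toNat) = pe.toNat := by omega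
      rw [h2, List.getElem?_eq_getElem hpeL]
      rfl
    have hlenPrev : (PySem.Str.slice seq1 (some start) (some pe)).toList.length
        = pe.toNat - start.toNat := by
      rw [slice_toList seq1 start pe hs (by omega)]
      simp only [List.length_take, List.length_drop]
      omega
    have hlenSub : PySem.Str.len (PySem.Str.slice seq1 (some start) (some e)) = e - start := by
      rw [PySem.Str.len_eq, slice_toList seq1 start e hs (by omega)]
      simp only [List.length_take, List.length_drop]
      omega
    -- minimality transfers from the previous substring to the current one
    have hminE : ∀ i, i < k →
        ¬ (PySem.Str.slice seq1 (some start) (some e)).toList <+: List.drop i seq2.toList := by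
      intro i hi hcon
      exact hprevMin i hi ((slice_prefix_mono seq1 start pe e hs (by omega) (by omega)).trans hcon)
    -- the port's extension-check condition
    by_cases hfast : (decide ((k : Int) + e - start ≤ PySem.Str.len seq2)
        && (PySem.Str.pyGet? seq2 ((k : Int) + e - start - 1) == PySem.Str.pyGet? seq1 (e - 1)))
        = true
    · -- fast branch: the previous occurrence extends, so k stays the first occurrence
      have hfast' := hfast
      rw [Bool.and_eq_true, decide_eq_true_eq] at hfast'
      obtain ⟨hroom, hchar⟩ := hfast'
      rw [PySem.Str.len_eq] at hroom
      have hroomN : k + (pe.toNat - start.toNat) + 1 ≤ seq2.toList.length := by omega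
      have hidx2 : (k : Int) + e - start - 1 = ((k + (pe.toNat - start.toNat) : Nat) : Int) := by
        omega
      have hidx1 : e - 1 = ((pe.toNat : Nat) : Int) := by omega
      rw [hidx2, hidx1, PySem.Str.pyGet?_natCast, PySem.Str.pyGet?_natCast] at hchar
      rw [List.getElem?_eq_getElem (by omega), List.getElem?_eq_getElem hpeL] at hchar
      have hcharEq : seq2.toList[k + (pe.toNat - start.toNat)]'(by omega)
          = seq1.toList[pe.toNat] := by
        simpa using hchar
      -- the current substring occurs at k …
      have hoccE : (PySem.Str.slice seq1 (some start) (some e)).toList <+: List.drop k seq2.toList := by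
        rw [hsub]
        rw [List.prefix_iff_eq_take] at hprevOcc ⊢
        rw [hlenPrev] at hprevOcc
        have hlenE : ((PySem.Str.slice seq1 (some start) (some pe)).toList
            ++ [seq1.toList[pe.toNat]]).length = (pe.toNat - start.toNat) + 1 := by
          simp only [List.length_append, List.length_cons, List.length_nil, hlenPrev]
        rw [hlenE, List.take_add_one, ← hprevOcc, List.getElem?_drop,
          List.getElem?_eq_getElem (by omega)]
        simp [hcharEq]
      -- … and k is still the first occurrence, so A's find returns exactly k
      have hfindE : PySem.Chars.find seq2.toList
          (PySem.Str.slice seq1 (some start) (some e)).toList = (k : Int) :=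
        find_eq_of_first _ _ k hoccE hminE
      have hisin : PySem.Str.isIn (PySem.Str.slice seq1 (some start) (some e)) seq2 = true := by
        rw [PySem.Str.isIn_eq]
        exact (PySem.Chars.isIn_iff_infix _ _).mpr (infix_of_prefix_drop hoccE)
      have hstep : fuzzyStepA seq1 seq2 start st e =
          (st.1 ++ [(start, (k : Int), PySem.Str.slice seq1 (some start) (some e))],
           if PySem.Str.len (PySem.Str.slice seq1 (some start) (some e)) > PySem.Str.len st.2.1
           then (PySem.Str.slice seq1 (some start) (some e), start, (k : Int))
           else st.2) := by
        simp only [fuzzyStepA, hisin, PySem.Str.find_eq, hfindE]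
        rfl
      rw [fuzzyInnerB, if_pos hfast]
      simp only [List.foldl_cons]
      rw [hstep, ← hlenSub]
      split_ifs with hgt
      · exact ih e k _ (by omega) (by omega) hk hoccE hminE
      · exact ih e k _ (by omega) (by omega) hk hoccE hminE
    · -- slow branch: one resumed find, then break or continue
      have hff : PySem.Str.findFrom seq2 (PySem.Str.slice seq1 (some start) (some e)) (k : Int) none
          = PySem.Str.find seq2 (PySem.Str.slice seq1 (some start) (some e)) := by
        rw [PySem.Str.findFrom_eq, PySem.Str.find_eq]
        exact findFrom_eq_find _ _ k hk hminE
      by_cases hin : (PySem.Str.slice seq1 (some start) (some e)).toList <:+: seq2.toList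
      · have hisin : PySem.Str.isIn (PySem.Str.slice seq1 (some start) (some e)) seq2 = true := by
          rw [PySem.Str.isIn_eq]
          exact (PySem.Chars.isIn_iff_infix _ _).mpr hin
        have hf0 : 0 ≤ PySem.Str.find seq2 (PySem.Str.slice seq1 (some start) (some e)) := by
          rw [PySem.Str.find_eq]
          exact (PySem.Chars.find_nonneg_iff _ _).mpr hin
        obtain ⟨hpre, hmin⟩ := PySem.Chars.find_spec ((PySem.Chars.find_nonneg_iff _ _).mpr hin)
        have hstep : fuzzyStepA seq1 seq2 start st e =
            (st.1 ++ [(start, PySem.Str.find seq2 (PySem.Str.slice seq1 (some start) (some e)),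
              PySem.Str.slice seq1 (some start) (some e))],
             if PySem.Str.len (PySem.Str.slice seq1 (some start) (some e)) > PySem.Str.len st.2.1
             then (PySem.Str.slice seq1 (some start) (some e), start,
               PySem.Str.find seq2 (PySem.Str.slice seq1 (some start) (some e)))
             else st.2) := by
          simp only [fuzzyStepA, hisin]
          rfl
        rw [fuzzyInnerB, if_neg hfast]
        simp only [hff]
        rw [if_neg (show ¬ (PySem.Str.find seq2 (PySem.Str.slice seq1 (some start) (some e)) < 0)
          by omega)]
        simp only [List.foldl_cons]
        rw [hstep, ← hlenSub]
        have hcast : PySem.Str.find seq2 (PySem.Str.slice seq1 (some start) (some e))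
            = (((PySem.Str.find seq2 (PySem.Str.slice seq1 (some start) (some e))).toNat : Nat) : Int) := by
          omega
        rw [hcast]
        have h2 := PySem.Str.find_eq seq2 (PySem.Str.slice seq1 (some start) (some e))
        have hkB : (PySem.Str.find seq2 (PySem.Str.slice seq1 (some start) (some e))).toNat
            ≤ seq2.toList.length := by
          have h1 := PySem.Chars.find_le_length seq2.toList
            (PySem.Str.slice seq1 (some start) (some e)).toList
          omega
        have hoccB : (PySem.Str.slice seq1 (some start) (some e)).toList <+:
            List.drop (PySem.Str.find seq2 (PySem.Str.slice seq1 (some start) (some e))).toNat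
              seq2.toList := by
          have h3 : (PySem.Str.find seq2 (PySem.Str.slice seq1 (some start) (some e))).toNat
              = (PySem.Chars.find seq2.toList
                  (PySem.Str.slice seq1 (some start) (some e)).toList).toNat := by
            rw [h2]
          rw [h3]
          exact hpre
        have hminB : ∀ i, i < (PySem.Str.find seq2
              (PySem.Str.slice seq1 (some start) (some e))).toNat →
            ¬ (PySem.Str.slice seq1 (some start) (some e)).toList <+: List.drop i seq2.toList := by
          intro i hi
          rw [h2] at hi
          exact hmin i hi
        split_ifs with hgt
        · exact ih e _ _ (by omega) (by omega) hkB hoccB hminB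
        · exact ih e _ _ (by omega) (by omega) hkB hoccB hminB
      · have hisin : PySem.Str.isIn (PySem.Str.slice seq1 (some start) (some e)) seq2 = false := by
          rw [PySem.Str.isIn_eq]
          exact (PySem.Chars.isIn_eq_false_iff _ _).mpr hin
        have hfneg : PySem.Str.findFrom seq2 (PySem.Str.slice seq1 (some start) (some e))
            (k : Int) none = -1 := by
          rw [hff, PySem.Str.find_eq]
          exact (PySem.Chars.find_eq_neg_one_iff _ _).mpr hin
        have hstep : fuzzyStepA seq1 seq2 start st e = st := by
          simp only [fuzzyStepA, hisin]
          rfl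
        rw [fuzzyInnerB, if_neg hfast]
        simp only [hfneg]
        rw [if_pos (by norm_num)]
        simp only [List.foldl_cons]
        rw [hstep, foldA_dead seq1 seq2 start (PySem.List.pyRange (e + 1) b 1) st (by
          intro e' he'
          have he'mem := PySem.List.mem_pyRange_one.mp he'
          rw [PySem.Str.isIn_eq, PySem.Chars.isIn_eq_false_iff]
          intro hcon
          exact hin (((slice_prefix_mono seq1 start e e' hs (by omega) (by omega)).isInfix).trans
            hcon))]

-- the outer loop: per start, the two inner loops agree and best stays the longest's length
lemma outerAB (seq1 seq2 : String) :
    ∀ (starts : List Int) (st : (List (Int × Int × String)) × (String × Int × Int)),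
    (∀ s ∈ starts, 0 ≤ s) →
    starts.foldl (fun stb start => fuzzyInnerB seq1 seq2 start
        (PySem.List.pyRange (start + 1) (PySem.Str.len seq1 + 1) 1) 0 stb)
      (st, PySem.Str.len st.2.1)
    = (starts.foldl (fun st start =>
        (PySem.List.pyRange (start + 1) (PySem.Str.len seq1 + 1) 1).foldl
          (fuzzyStepA seq1 seq2 start) st) st,
       PySem.Str.len (starts.foldl (fun st start =>
        (PySem.List.pyRange (start + 1) (PySem.Str.len seq1 + 1) 1).foldl
          (fuzzyStepA seq1 seq2 start) st) st).2.1) := by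
  intro starts
  induction starts with
  | nil => intro st _; rfl
  | cons s rest ih =>
    intro st h
    have hs : 0 ≤ s := h s List.mem_cons_self
    simp only [List.foldl_cons]
    have hnil : (PySem.Str.slice seq1 (some s) (some s)).toList = [] := by
      rw [slice_toList seq1 s s hs hs]
      simp
    have hinner := innerAB seq1 seq2 s (PySem.Str.len seq1 + 1) hs
      (by rw [PySem.Str.len_eq])
      ((PySem.Str.len seq1 + 1) - s - 1).toNat s 0 st rfl le_rfl (Nat.zero_le _)
      (by rw [hnil]; exact List.nil_prefix)
      (by intro i hi; omega)
    rw [Nat.cast_zero] at hinner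
    rw [hinner]
    exact ih _ (fun s' hs' => h s' (List.mem_cons_of_mem _ hs'))

-- ===== VERDICT (by name: the statement is the Claim_ definition above) =====
theorem find_fuzzy_matches_spec : Claim_equal_find_fuzzy_matches := by
  intro seq1 seq2 _
  unfold Spec_find_fuzzy_matches find_fuzzy_matches find_fuzzy_matches_alt
  have h := outerAB seq1 seq2 (PySem.List.pyRange 0 (PySem.Str.len seq1) 1)
    ([], ("", -1, -1)) (fun s hs => (PySem.List.mem_pyRange_one.mp hs).1)
  have h0 : PySem.Str.len (((([] : List (Int × Int × String)),
      (("" : String), (-1 : Int), (-1 : Int)))).2.1) = 0 := by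
    rw [PySem.Str.len_eq]
    rfl
  rw [h0] at h
  exact (congrArg Prod.fst h).symm
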